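-- pv_equiv track=rewrite | github.com/askari1375/Sample-Codes | Crawler/create_tex_file.py | merge_elements
-- ===== SOURCE A (Python) =====
-- def merge_elements(annotated_list):
--     res = []
--     previous_label = -1
--     for label, e in annotated_list:
--
--         if label == 0:
--             if e[-1] != "\n":
--                 e += "\n"
--
--         if label != previous_label:
--             res.append([label, e])
--             previous_label = label
--         else:
--             previous_e = res[-1][1]
--             if e == "\n":
--                 if previous_e[-1] != "\n":
--                     res[-1] = [label, previous_e + e]
--             elif e == "\t":
--                 if previous_e[-1] != "\t":
--                     res[-1] = [label, previous_e + e]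
--             else:
--                 res[-1] = [label, previous_e + e]
--                 if label == 0:
--                     res[-1] = [label, res[-1][1] + "\n"]
--
--     for k in range(len(res)):
--         res[k] = (res[k][0], res[k][1])
--
--     return res
-- ===== SOURCE B (Python) =====
-- def _absorb(label, acc, e):
--     if e == "\n":
--         return acc if acc.endswith("\n") else acc + e
--     if e == "\t":
--         return acc if acc.endswith("\t") else acc + e
--     acc = acc + e
--     if label == 0:
--         acc = acc + "\n"
--     return acc
--
--
-- def merge_elements(annotated_list):
--     # pass 1: normalize label-0 elements so they end in a newline
--     items = [(l, e) if l != 0 or e.endswith("\n") else (l, e + "\n")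
--              for l, e in annotated_list]
--     # pass 2: walk run boundaries; fold each maximal same-label run into one string
--     res = []
--     i, n = 0, len(items)
--     while i < n:
--         label = items[i][0]
--         j = i + 1
--         while j < n and items[j][0] == label:
--             j += 1
--         merged = items[i][1]
--         for k in range(i + 1, j):
--             merged = _absorb(label, merged, items[k][1])
--         res.append((label, merged))
--         i = j
--     return res
-- ===== Notes on version B (the rewrite author's own statement) =====
-- stated objective: alternative
-- what changed: A makes one pass that appends to and repeatedly rewrites the last cell of the result list (plus a final tuple-conversion pass); B first normalizes label-0 elements in a separate map pass, then detects each maximal same-label run with a boundary scan and folds that run into one string with a helper, emitting each output tuple exactly once. Pre_ excludes exactly the inputs where A raises IndexError (an element (0,''), a first label of -1, or a '\n'/'\t' continuing an all-empty run).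
import Mathlib
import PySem

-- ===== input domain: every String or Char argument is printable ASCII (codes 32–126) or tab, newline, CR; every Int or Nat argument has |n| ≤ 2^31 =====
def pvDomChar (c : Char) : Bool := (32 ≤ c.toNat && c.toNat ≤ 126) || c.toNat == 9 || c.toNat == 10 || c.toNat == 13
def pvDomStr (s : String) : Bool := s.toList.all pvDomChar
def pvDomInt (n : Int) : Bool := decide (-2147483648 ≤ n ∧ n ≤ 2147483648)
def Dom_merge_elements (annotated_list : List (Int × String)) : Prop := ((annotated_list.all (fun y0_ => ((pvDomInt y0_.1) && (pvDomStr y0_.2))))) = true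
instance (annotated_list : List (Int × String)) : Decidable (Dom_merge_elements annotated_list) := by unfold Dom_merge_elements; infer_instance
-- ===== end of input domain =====

-- B folds each maximal same-label run after a separate normalization pass, instead of
-- A's single pass that rewrites the last result cell; same values, no speed claim.

-- ===== PORT A =====
-- e[-1] != "c" is ported as PySem.Str.pyGet? e (-1) ≠ some 'c' (none = IndexError, excluded by Pre_).
def pvFixA (label : Int) (e : String) : String :=
  if label = 0 then (if PySem.Str.pyGet? e (-1) ≠ some '\n' then e ++ "\n" else e) else e

-- the else-branch of A's loop: merge e into previous_e (res[-1][1])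
def pvMergeA (label : Int) (previous_e e : String) : String :=
  if e = "\n" then
    (if PySem.Str.pyGet? previous_e (-1) ≠ some '\n' then previous_e ++ e else previous_e)
  else if e = "\t" then
    (if PySem.Str.pyGet? previous_e (-1) ≠ some '\t' then previous_e ++ e else previous_e)
  else
    (if label = 0 then (previous_e ++ e) ++ "\n" else previous_e ++ e)

-- loop body over state (res, previous_label); res[-1] = [...] is dropLast ++ [new]
def pvStepA (st : List (Int × String) × Int) (p : Int × String) : List (Int × String) × Int :=
  let e := pvFixA p.1 p.2
  if p.1 ≠ st.2 then (st.1 ++ [(p.1, e)], p.1)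
  else
    let previous_e := ((PySem.List.pyGet? st.1 (-1)).map Prod.snd).getD ""  -- res[-1][1]; none (IndexError) excluded by Pre_
    (st.1.dropLast ++ [(p.1, pvMergeA p.1 previous_e e)], st.2)

-- the final for-k loop turns [label, e] lists into tuples: identity under our typing
def merge_elements (annotated_list : List (Int × String)) : List (Int × String) :=
  (annotated_list.foldl pvStepA ([], -1)).1

-- ===== PORT B =====
def pvAbsorb (label : Int) (acc e : String) : String :=
  if e = "\n" then (if PySem.Str.endswith acc "\n" then acc else acc ++ e)
  else if e = "\t" then (if PySem.Str.endswith acc "\t" then acc else acc ++ e)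
  else
    let acc2 := acc ++ e
    if label = 0 then acc2 ++ "\n" else acc2

-- pass 1 of Source B: normalize label-0 elements
def pvFixB (p : Int × String) : Int × String :=
  if p.1 ≠ 0 ∨ PySem.Str.endswith p.2 "\n" then p else (p.1, p.2 ++ "\n")

-- Source B's inner index scan "while j < n and items[j][0] == label: j += 1" ported
-- structurally: split off the maximal prefix with the given label.
def pvRunSplit (label : Int) : List (Int × String) → List (Int × String) × List (Int × String)
  | [] => ([], [])
  | p :: t => if p.1 = label then ((pvRunSplit label t).1.cons p, (pvRunSplit label t).2) else ([], p :: t)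

theorem pvRunSplit_rest_len (label : Int) (l : List (Int × String)) :
    (pvRunSplit label l).2.length ≤ l.length := by
  induction l with
  | nil => simp [pvRunSplit]
  | cons p t ih =>
    by_cases h : p.1 = label <;> simp [pvRunSplit, h]
    exact Nat.le_succ_of_le ih

-- Source B's outer while loop: one output tuple per run
def pvLoopB : List (Int × String) → List (Int × String)
  | [] => []
  | p :: t =>
    (p.1, (pvRunSplit p.1 t).1.foldl (fun acc q => pvAbsorb p.1 acc q.2) p.2) :: pvLoopB (pvRunSplit p.1 t).2
  termination_by l => l.length
  decreasing_by
    exact Nat.lt_succ_of_le (pvRunSplit_rest_len _ _)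

def merge_elements_alt (annotated_list : List (Int × String)) : List (Int × String) :=
  pvLoopB (annotated_list.map pvFixB)

-- ===== PRECONDITION & SPEC =====
-- Pre_ excludes exactly the inputs on which Python A raises IndexError: an element (0, "")
-- (e[-1] on an empty string), a first element with label -1 (res[-1] on the empty result, since
-- previous_label starts at -1), or a "\n"/"\t" element that continues a run whose previous
-- elements are all empty strings (previous_e[-1] on an empty accumulator).
def Pre_merge_elements (annotated_list : List (Int × String)) : Prop :=
  ¬ ∃ i : Fin annotated_list.length,
      ((i.1 = 0 ∧ annotated_list[i].1 = -1) ∨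
       (annotated_list[i].1 = 0 ∧ annotated_list[i].2 = "") ∨
       (∃ jm : Fin annotated_list.length, jm.1 + 1 = i.1 ∧
          annotated_list[jm].1 = annotated_list[i].1 ∧
          (annotated_list[i].2 = "\n" ∨ annotated_list[i].2 = "\t") ∧
          ∀ j : Fin annotated_list.length, j.1 < i.1 →
            (∀ k : Fin annotated_list.length, j.1 ≤ k.1 → k.1 < i.1 →
              annotated_list[k].1 = annotated_list[i].1) →
            annotated_list[j].2 = ""))

instance (annotated_list : List (Int × String)) : Decidable (Pre_merge_elements annotated_list) := by
  unfold Pre_merge_elements; infer_instance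

def pvWitness_merge_elements : (List (Int × String)) := [(0, "a"), (0, "b\n"), (1, "\n"), (1, "x"), (1, "\n")]

def Spec_merge_elements (annotated_list : List (Int × String)) (out : List (Int × String)) : Prop := out = merge_elements_alt annotated_list
instance (annotated_list : List (Int × String)) (out : List (Int × String)) : Decidable (Spec_merge_elements annotated_list out) := by unfold Spec_merge_elements; infer_instance

-- ===== CLAIM (what is proved, stated in full; the proofs are below) =====
def Claim_equal_merge_elements : Prop := ∀ (annotated_list : List (Int × String)), Dom_merge_elements annotated_list → Pre_merge_elements annotated_list → Spec_merge_elements annotated_list (merge_elements annotated_list)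

-- ===== LEMMAS AND PROOFS =====

-- proof-only intermediate: B's computation expressed as one recursion over the raw input
def pvGo (label : Int) (acc : String) : List (Int × String) → List (Int × String)
  | [] => [(label, acc)]
  | p :: t =>
    if p.1 = label then pvGo label (pvAbsorb label acc (pvFixB p).2) t
    else (label, acc) :: pvGo p.1 (pvFixB p).2 t

theorem pvFixB_fst (p : Int × String) : (pvFixB p).1 = p.1 := by
  unfold pvFixB; split <;> rfl

-- s.endswith(single char) tests the last character, exactly A's s[-1] test
theorem pvEndswith_last (s : String) (c : Char) :
    PySem.Str.endswith s (String.ofList [c]) = true ↔ PySem.Str.pyGet? s (-1) = some c := by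
  simp [PySem.Chars.endswith_iff, PySem.List.pyGet?_neg_one]
  constructor
  · rintro ⟨t, ht⟩; rw [← ht]; simp
  · intro h
    obtain ⟨t, ht⟩ := List.getLast?_eq_some_iff.mp h
    exact ⟨t, ht.symm⟩

theorem pvFix_agree (label : Int) (e : String) : pvFixA label e = (pvFixB (label, e)).2 := by
  unfold pvFixA pvFixB
  by_cases h0 : label = 0
  · by_cases hg : PySem.Str.pyGet? e (-1) = some '\n'
    · rw [if_pos h0, if_neg (by simpa using hg),
        if_pos (Or.inr ((pvEndswith_last e '\n').mpr hg) :
          (label, e).1 ≠ 0 ∨ PySem.Str.endswith (label, e).2 "\n" = true)]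
    · rw [if_pos h0, if_pos hg,
        if_neg (show ¬((label, e).1 ≠ 0 ∨ PySem.Str.endswith (label, e).2 "\n" = true) by
          rintro (h | h)
          · exact h h0
          · exact hg ((pvEndswith_last e '\n').mp h))]
  · rw [if_neg h0, if_pos (Or.inl h0 : (label, e).1 ≠ 0 ∨ PySem.Str.endswith (label, e).2 "\n" = true)]

theorem pvMerge_agree_char (acc e : String) (c : Char) :
    (if PySem.Str.pyGet? acc (-1) ≠ some c then acc ++ e else acc) =
      (if PySem.Str.endswith acc (String.ofList [c]) = true then acc else acc ++ e) := by
  by_cases hg : PySem.Str.pyGet? acc (-1) = some c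
  · rw [if_neg (by simpa using hg), if_pos ((pvEndswith_last acc c).mpr hg)]
  · rw [if_pos hg, if_neg (fun h => hg ((pvEndswith_last acc c).mp h))]

theorem pvMerge_agree (label : Int) (acc e : String) : pvMergeA label acc e = pvAbsorb label acc e := by
  unfold pvMergeA pvAbsorb
  by_cases h1 : e = "\n"
  · rw [if_pos h1, if_pos h1]
    exact pvMerge_agree_char acc e '\n'
  · rw [if_neg h1, if_neg h1]
    by_cases h3 : e = "\t"
    · rw [if_pos h3, if_pos h3]
      exact pvMerge_agree_char acc e '\t'
    · rw [if_neg h3, if_neg h3]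

-- B as pvGo
theorem pvLoopB_go (t : List (Int × String)) :
    ∀ (label : Int) (acc : String),
      ((label, (pvRunSplit label (t.map pvFixB)).1.foldl (fun a q => pvAbsorb label a q.2) acc)
        :: pvLoopB (pvRunSplit label (t.map pvFixB)).2) = pvGo label acc t := by
  induction t with
  | nil => intro label acc; simp [pvRunSplit, pvLoopB, pvGo]
  | cons p t ih =>
    intro label acc
    by_cases h : p.1 = label
    · simp only [List.map_cons, pvRunSplit, pvFixB_fst, h, pvGo]
      exact ih label (pvAbsorb label acc (pvFixB p).2)
    · have hf : (pvFixB p).1 ≠ label := by rw [pvFixB_fst]; exact h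
      simp only [List.map_cons, pvRunSplit, if_neg hf, List.foldl_nil, pvGo, if_neg h]
      rw [pvLoopB, pvFixB_fst]
      exact congrArg _ (ih p.1 (pvFixB p).2)

-- A's fold as pvGo
theorem pvFoldA_go (t : List (Int × String)) :
    ∀ (res : List (Int × String)) (label : Int) (acc : String),
      (t.foldl pvStepA (res ++ [(label, acc)], label)).1 = res ++ pvGo label acc t := by
  induction t with
  | nil => intro res label acc; simp [pvGo]
  | cons p t ih =>
    intro res label acc
    by_cases h : p.1 = label
    · have hstep : pvStepA (res ++ [(label, acc)], label) p
          = (res ++ [(label, pvAbsorb label acc (pvFixB p).2)], label) := by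
        simp only [pvStepA, h, ne_eq, not_true_eq_false, if_false]
        rw [PySem.List.pyGet?_neg_one_append_singleton]
        have : pvMergeA label acc (pvFixA label p.2) = pvAbsorb label acc (pvFixB p).2 := by
          rw [pvMerge_agree, pvFix_agree, ← h, Prod.mk.eta]
        simp [this]
      rw [List.foldl_cons, hstep, ih, pvGo, if_pos h]
    · have hstep : pvStepA (res ++ [(label, acc)], label) p
          = ((res ++ [(label, acc)]) ++ [(p.1, pvFixA p.1 p.2)], p.1) := by
        simp [pvStepA, h]
      rw [List.foldl_cons, hstep, ih, pvGo, if_neg h, pvFix_agree]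
      simp

-- ===== VERDICT (by name: the statement is the Claim_ definition above) =====
theorem merge_elements_spec : Claim_equal_merge_elements := by
  intro l _hdom hpre
  unfold Spec_merge_elements merge_elements merge_elements_alt
  cases l with
  | nil => rw [List.map_nil, pvLoopB]; rfl
  | cons p t =>
    have hp : p.1 ≠ -1 := fun h =>
      hpre ⟨⟨0, by simp⟩, Or.inl ⟨rfl, h⟩⟩
    have hfirst : pvStepA ([], -1) p = ([] ++ [(p.1, pvFixA p.1 p.2)], p.1) := by
      simp [pvStepA, hp]
    rw [List.foldl_cons, hfirst, pvFoldA_go, List.map_cons, pvLoopB, pvFixB_fst,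
      pvLoopB_go, pvFix_agree]
    simp
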